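-- pv_equiv track=rewrite | github.com/Spenquatch/gsd-browser | gsd-browser/src/gsd_browser/legacy_cli.py | _find_mapped_prefix
-- ===== SOURCE A (Python) =====
-- from typing import Final
--
-- _LEGACY_ARGV_PREFIX_MAP: Final[dict[tuple[str, ...], tuple[str, ...]]] = {
--     ("serve",): ("mcp", "serve"),
--     ("mcp-config",): ("mcp", "config"),
--     ("mcp-config-add",): ("mcp", "add"),
--     ("mcp-tool-smoke",): ("mcp", "smoke"),
--     ("list-tools",): ("mcp", "tools", "list"),
--     ("mcp-tools",): ("mcp", "tools"),
--     ("mcp-tools", "list"): ("mcp", "tools", "list"),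
--     ("mcp-tools", "enable"): ("mcp", "tools", "enable"),
--     ("mcp-tools", "disable"): ("mcp", "tools", "disable"),
--     ("mcp-tools", "set-enabled"): ("mcp", "tools", "allow"),
--     ("mcp-tools", "set-disabled"): ("mcp", "tools", "deny"),
--     ("mcp-tools", "reset"): ("mcp", "tools", "reset"),
--     ("init-env",): ("config", "init"),
--     ("configure",): ("config", "set"),
--     ("ensure-browser",): ("browser", "ensure"),
--     ("serve-browser",): ("stream", "serve"),
--     ("validate-llm",): ("llm", "validate"),
--     ("diagnose",): ("dev", "diagnose"),
--     ("serve-echo",): ("dev", "echo"),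
--     ("smoke",): ("dev", "smoke"),
-- }
--
-- def _find_mapped_prefix(argv: list[str]) -> tuple[tuple[str, ...], tuple[str, ...]] | None:
--     if not argv:
--         return None
--
--     max_prefix_len = max(len(k) for k in _LEGACY_ARGV_PREFIX_MAP)
--     for length in range(max_prefix_len, 0, -1):
--         key = tuple(argv[:length])
--         canonical_prefix = _LEGACY_ARGV_PREFIX_MAP.get(key)
--         if canonical_prefix is not None:
--             return key, canonical_prefix
--
--     return None
-- ===== SOURCE B (Python) =====
-- from typing import Final
--
-- # Trie-style staged lookup: the mapping split by key arity.  Only "mcp-tools"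
-- # has two-token keys, so the longest match is decided by two direct lookups.
--
-- _MCP_TOOLS_SUBMAP: Final[dict[str, tuple[str, ...]]] = {
--     "list": ("mcp", "tools", "list"),
--     "enable": ("mcp", "tools", "enable"),
--     "disable": ("mcp", "tools", "disable"),
--     "set-enabled": ("mcp", "tools", "allow"),
--     "set-disabled": ("mcp", "tools", "deny"),
--     "reset": ("mcp", "tools", "reset"),
-- }
--
-- _SINGLE_MAP: Final[dict[str, tuple[str, ...]]] = {
--     "serve": ("mcp", "serve"),
--     "mcp-config": ("mcp", "config"),
--     "mcp-config-add": ("mcp", "add"),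
--     "mcp-tool-smoke": ("mcp", "smoke"),
--     "list-tools": ("mcp", "tools", "list"),
--     "mcp-tools": ("mcp", "tools"),
--     "init-env": ("config", "init"),
--     "configure": ("config", "set"),
--     "ensure-browser": ("browser", "ensure"),
--     "serve-browser": ("stream", "serve"),
--     "validate-llm": ("llm", "validate"),
--     "diagnose": ("dev", "diagnose"),
--     "serve-echo": ("dev", "echo"),
--     "smoke": ("dev", "smoke"),
-- }
--
--
-- def _find_mapped_prefix(argv: list[str]) -> tuple[tuple[str, ...], tuple[str, ...]] | None:
--     if len(argv) >= 2 and argv[0] == "mcp-tools":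
--         sub = _MCP_TOOLS_SUBMAP.get(argv[1])
--         if sub is not None:
--             return ("mcp-tools", argv[1]), sub
--     if argv:
--         one = _SINGLE_MAP.get(argv[0])
--         if one is not None:
--             return (argv[0],), one
--     return None
-- ===== Notes on version B (the rewrite author's own statement) =====
-- stated objective: alternative
-- what changed: Replaces the length-descending candidate-slicing loop over one flat tuple-keyed table by a trie-style staged lookup: the mapping is split by key arity into a second-token submap under 'mcp-tools' and a one-token map, tried longest first.
import Mathlib
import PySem

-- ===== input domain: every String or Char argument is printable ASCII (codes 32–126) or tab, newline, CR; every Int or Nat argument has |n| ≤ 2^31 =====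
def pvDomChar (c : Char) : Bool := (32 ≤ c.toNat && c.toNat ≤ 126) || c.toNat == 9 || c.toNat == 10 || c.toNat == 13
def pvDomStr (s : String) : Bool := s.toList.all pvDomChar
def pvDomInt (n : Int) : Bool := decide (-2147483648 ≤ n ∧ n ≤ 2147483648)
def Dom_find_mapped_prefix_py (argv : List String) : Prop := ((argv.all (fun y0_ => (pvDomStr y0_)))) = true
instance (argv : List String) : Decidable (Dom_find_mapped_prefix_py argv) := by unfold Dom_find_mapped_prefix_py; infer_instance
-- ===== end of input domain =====

-- B replaces A's length-descending candidate-slicing loop over one flat table by a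
-- trie-style staged lookup: the mapping split by key arity into two small dicts,
-- a two-token lookup tried first, then a one-token lookup (objective: alternative).


-- ===== PORT A =====
-- _LEGACY_ARGV_PREFIX_MAP as an insertion-ordered association list (its keys are distinct literals)
def legacyMap : List (List String × List String) := [
  (["serve"], ["mcp", "serve"]),
  (["mcp-config"], ["mcp", "config"]),
  (["mcp-config-add"], ["mcp", "add"]),
  (["mcp-tool-smoke"], ["mcp", "smoke"]),
  (["list-tools"], ["mcp", "tools", "list"]),
  (["mcp-tools"], ["mcp", "tools"]),
  (["mcp-tools", "list"], ["mcp", "tools", "list"]),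
  (["mcp-tools", "enable"], ["mcp", "tools", "enable"]),
  (["mcp-tools", "disable"], ["mcp", "tools", "disable"]),
  (["mcp-tools", "set-enabled"], ["mcp", "tools", "allow"]),
  (["mcp-tools", "set-disabled"], ["mcp", "tools", "deny"]),
  (["mcp-tools", "reset"], ["mcp", "tools", "reset"]),
  (["init-env"], ["config", "init"]),
  (["configure"], ["config", "set"]),
  (["ensure-browser"], ["browser", "ensure"]),
  (["serve-browser"], ["stream", "serve"]),
  (["validate-llm"], ["llm", "validate"]),
  (["diagnose"], ["dev", "diagnose"]),
  (["serve-echo"], ["dev", "echo"]),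
  (["smoke"], ["dev", "smoke"])]

def legacyDict : PySem.Dict (List String) (List String) := PySem.Dict.ofList legacyMap

-- A's 'for length in range(max_prefix_len, 0, -1): … return key, canonical_prefix' with early return
def aLoop (argv : List String) : List Int → Option (List String × List String)
  | [] => none
  | length :: rest =>
    let key := PySem.List.slice argv none (some length)
    match PySem.Dict.get? legacyDict key with
    | some canonicalPrefix => some (key, canonicalPrefix)
    | none => aLoop argv rest

def find_mapped_prefix_py (argv : List String) : Option (List String × List String) :=
  if argv = [] then none
  else
    -- max(len(k) for k in _LEGACY_ARGV_PREFIX_MAP); the table is a nonempty constant, so max? = some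
    let maxPrefixLen := (PySem.List.max? (legacyMap.map (fun kv => PySem.List.len kv.1)) (fun x => x)).getD 0
    aLoop argv (PySem.List.pyRange maxPrefixLen 0 (-1))

-- ===== PORT B =====
-- the mapping split by key arity: second-token submap under "mcp-tools", and the one-token map
def subList : List (String × List String) := [
  ("list", ["mcp", "tools", "list"]),
  ("enable", ["mcp", "tools", "enable"]),
  ("disable", ["mcp", "tools", "disable"]),
  ("set-enabled", ["mcp", "tools", "allow"]),
  ("set-disabled", ["mcp", "tools", "deny"]),
  ("reset", ["mcp", "tools", "reset"])]

def mcpToolsSubmap : PySem.Dict String (List String) := PySem.Dict.ofList subList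

def singleList : List (String × List String) := [
  ("serve", ["mcp", "serve"]),
  ("mcp-config", ["mcp", "config"]),
  ("mcp-config-add", ["mcp", "add"]),
  ("mcp-tool-smoke", ["mcp", "smoke"]),
  ("list-tools", ["mcp", "tools", "list"]),
  ("mcp-tools", ["mcp", "tools"]),
  ("init-env", ["config", "init"]),
  ("configure", ["config", "set"]),
  ("ensure-browser", ["browser", "ensure"]),
  ("serve-browser", ["stream", "serve"]),
  ("validate-llm", ["llm", "validate"]),
  ("diagnose", ["dev", "diagnose"]),
  ("serve-echo", ["dev", "echo"]),
  ("smoke", ["dev", "smoke"])]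

def singleMap : PySem.Dict String (List String) := PySem.Dict.ofList singleList

def find_mapped_prefix_py_alt (argv : List String) : Option (List String × List String) :=
  match argv with
  | a0 :: a1 :: _ =>
    -- 'if len(argv) >= 2 and argv[0] == "mcp-tools": …'
    if a0 = "mcp-tools" then
      match mcpToolsSubmap.get? a1 with
      | some sub => some (["mcp-tools", a1], sub)
      | none =>
        match singleMap.get? a0 with
        | some one => some ([a0], one)
        | none => none
    else
      match singleMap.get? a0 with
      | some one => some ([a0], one)
      | none => none
  | [a0] =>
    match singleMap.get? a0 with
    | some one => some ([a0], one)
    | none => none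
  | [] => none

-- ===== PRECONDITION & SPEC =====
def Spec_find_mapped_prefix_py (argv : List String) (out : Option (List String × List String)) : Prop := out = find_mapped_prefix_py_alt argv
instance (argv : List String) (out : Option (List String × List String)) : Decidable (Spec_find_mapped_prefix_py argv out) := by unfold Spec_find_mapped_prefix_py; infer_instance

-- ===== CLAIM (what is proved, stated in full; the proofs are below) =====
def Claim_equal_find_mapped_prefix_py : Prop := ∀ (argv : List String), Dom_find_mapped_prefix_py argv → Spec_find_mapped_prefix_py argv (find_mapped_prefix_py argv)

-- ===== LEMMAS AND PROOFS =====

-- A's dict lookup over the literal table, as a first-match scan of the underlying item list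
lemma get?_legacy (k : List String) :
    legacyDict.get? k = Option.map (fun x => x.2) (List.find? (fun p => p.1 == k) legacyMap) := by
  have h : legacyDict.items = legacyMap := by decide
  simp [PySem.Dict.get?, h]

-- B's dict lookups over their literal tables, as first-match scans of the underlying item lists
lemma get?_sub (k : String) :
    mcpToolsSubmap.get? k = Option.map (fun x => x.2) (List.find? (fun p => p.1 == k) subList) := by
  have h : mcpToolsSubmap.items = subList := by decide
  simp [PySem.Dict.get?, h]

lemma get?_single (k : String) :
    singleMap.get? k = Option.map (fun x => x.2) (List.find? (fun p => p.1 == k) singleList) := by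
  have h : singleMap.items = singleList := by decide
  simp [PySem.Dict.get?, h]

-- on a nonempty argv, A's closed maximum-length computation and countdown range reduce to [2, 1]
lemma A_cons (x : String) (xs : List String) : find_mapped_prefix_py (x::xs) = aLoop (x::xs) [2,1] := rfl

set_option maxHeartbeats 2000000 in
theorem find_mapped_prefix_py_spec_aux : ∀ (argv : List String),
    find_mapped_prefix_py argv = find_mapped_prefix_py_alt argv := by
  intro argv
  match argv with
  | [] => decide
  | [a] =>
    by_cases ha1 : a = "serve"
    · subst ha1; rfl
    by_cases ha2 : a = "mcp-config"
    · subst ha2; rfl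
    by_cases ha3 : a = "mcp-config-add"
    · subst ha3; rfl
    by_cases ha4 : a = "mcp-tool-smoke"
    · subst ha4; rfl
    by_cases ha5 : a = "list-tools"
    · subst ha5; rfl
    by_cases ha6 : a = "mcp-tools"
    · subst ha6; rfl
    by_cases ha7 : a = "init-env"
    · subst ha7; rfl
    by_cases ha8 : a = "configure"
    · subst ha8; rfl
    by_cases ha9 : a = "ensure-browser"
    · subst ha9; rfl
    by_cases ha10 : a = "serve-browser"
    · subst ha10; rfl
    by_cases ha11 : a = "validate-llm"
    · subst ha11; rfl
    by_cases ha12 : a = "diagnose"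
    · subst ha12; rfl
    by_cases ha13 : a = "serve-echo"
    · subst ha13; rfl
    by_cases ha14 : a = "smoke"
    · subst ha14; rfl
    rw [A_cons]
    have sha1 := Ne.symm ha1
    have sha2 := Ne.symm ha2
    have sha3 := Ne.symm ha3
    have sha4 := Ne.symm ha4
    have sha5 := Ne.symm ha5
    have sha6 := Ne.symm ha6
    have sha7 := Ne.symm ha7
    have sha8 := Ne.symm ha8
    have sha9 := Ne.symm ha9
    have sha10 := Ne.symm ha10
    have sha11 := Ne.symm ha11
    have sha12 := Ne.symm ha12
    have sha13 := Ne.symm ha13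
    have sha14 := Ne.symm ha14
    simp only [find_mapped_prefix_py_alt, aLoop, get?_legacy, legacyMap, List.find?,
      get?_sub, get?_single, subList, singleList,
      PySem.List.slice, PySem.List.len, PySem.List.clampIdx]
    simp [beq_eq_decide, ha1, ha2, ha3, ha4, ha5, ha6, ha7, ha8, ha9, ha10, ha11, ha12, ha13, ha14, sha1, sha2, sha3, sha4, sha5, sha6, sha7, sha8, sha9, sha10, sha11, sha12, sha13, sha14]
  | a :: b :: r =>
    by_cases hm : a = "mcp-tools"
    · subst hm
      by_cases hb1 : b = "list"
      · subst hb1; rfl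
      by_cases hb2 : b = "enable"
      · subst hb2; rfl
      by_cases hb3 : b = "disable"
      · subst hb3; rfl
      by_cases hb4 : b = "set-enabled"
      · subst hb4; rfl
      by_cases hb5 : b = "set-disabled"
      · subst hb5; rfl
      by_cases hb6 : b = "reset"
      · subst hb6; rfl
      have shb1 := Ne.symm hb1
      have shb2 := Ne.symm hb2
      have shb3 := Ne.symm hb3
      have shb4 := Ne.symm hb4
      have shb5 := Ne.symm hb5
      have shb6 := Ne.symm hb6
      rw [A_cons]
      simp only [find_mapped_prefix_py_alt, aLoop, get?_legacy, legacyMap, List.find?,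
        get?_sub, get?_single, subList, singleList,
        PySem.List.slice, PySem.List.len, PySem.List.clampIdx]
      simp [beq_eq_decide, hb1, hb2, hb3, hb4, hb5, hb6, shb1, shb2, shb3, shb4, shb5, shb6]
    · -- a is not "mcp-tools"
      by_cases ha1 : a = "serve"
      · subst ha1; rfl
      by_cases ha2 : a = "mcp-config"
      · subst ha2; rfl
      by_cases ha3 : a = "mcp-config-add"
      · subst ha3; rfl
      by_cases ha4 : a = "mcp-tool-smoke"
      · subst ha4; rfl
      by_cases ha5 : a = "list-tools"
      · subst ha5; rfl
      by_cases ha6 : a = "init-env"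
      · subst ha6; rfl
      by_cases ha7 : a = "configure"
      · subst ha7; rfl
      by_cases ha8 : a = "ensure-browser"
      · subst ha8; rfl
      by_cases ha9 : a = "serve-browser"
      · subst ha9; rfl
      by_cases ha10 : a = "validate-llm"
      · subst ha10; rfl
      by_cases ha11 : a = "diagnose"
      · subst ha11; rfl
      by_cases ha12 : a = "serve-echo"
      · subst ha12; rfl
      by_cases ha13 : a = "smoke"
      · subst ha13; rfl
      have sha1 := Ne.symm ha1
      have sha2 := Ne.symm ha2
      have sha3 := Ne.symm ha3
      have sha4 := Ne.symm ha4
      have sha5 := Ne.symm ha5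
      have sha6 := Ne.symm ha6
      have sha7 := Ne.symm ha7
      have sha8 := Ne.symm ha8
      have sha9 := Ne.symm ha9
      have sha10 := Ne.symm ha10
      have sha11 := Ne.symm ha11
      have sha12 := Ne.symm ha12
      have sha13 := Ne.symm ha13
      have shm := Ne.symm hm
      rw [A_cons]
      simp only [find_mapped_prefix_py_alt, aLoop, get?_legacy, legacyMap, List.find?,
        get?_sub, get?_single, subList, singleList,
        PySem.List.slice, PySem.List.clampIdx]
      simp [beq_eq_decide, hm, shm, sha1, sha2, sha3, sha4, sha5, sha6, sha7, sha8, sha9, sha10, sha11, sha12, sha13]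

-- ===== VERDICT (by name: the statement is the Claim_ definition above) =====
theorem find_mapped_prefix_py_spec : Claim_equal_find_mapped_prefix_py := by
  intro argv _
  unfold Spec_find_mapped_prefix_py
  exact find_mapped_prefix_py_spec_aux argv
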